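-- pv_equiv track=rewrite | github.com/PKhing/COMP_PROG | Grader/P2/P2_01_Func1.py | zip_odds
-- ===== SOURCE A (Python) =====
-- def get_odds(x):
--     ans = []
--     for i in x:
--         if i%2==1:
--             ans.append(i)
--     return ans
--
-- def zip_odds(a, b):
--     oa = get_odds(a)
--     ob = get_odds(b)
--     ans = []
--     i = 0
--     j = 0
--     while i < len(oa) or j < len(ob):
--         if i < len(oa):
--             ans.append(oa[i])
--             i+=1
--         if j < len(ob):
--             ans.append(ob[j])
--             j+=1
--     return ans
-- ===== SOURCE B (Python) =====
-- def zip_odds(a, b):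
--     oa = [x for x in a if x % 2 == 1]
--     ob = [x for x in b if x % 2 == 1]
--     out = []
--     for x, y in zip(oa, ob):
--         out.append(x)
--         out.append(y)
--     n = min(len(oa), len(ob))
--     return out + oa[n:] + ob[n:]
-- ===== Notes on version B (the rewrite author's own statement) =====
-- stated objective: alternative
-- what changed: Replaces A's single merged two-index while-loop with a 'zip the common prefix, then concatenate the leftover tails' decomposition: odds are filtered by comprehensions, the paired prefix is flattened from zip(oa, ob), and the longer tail oa[n:]/ob[n:] (n = min of lengths) is appended afterwards.
import Mathlib
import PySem

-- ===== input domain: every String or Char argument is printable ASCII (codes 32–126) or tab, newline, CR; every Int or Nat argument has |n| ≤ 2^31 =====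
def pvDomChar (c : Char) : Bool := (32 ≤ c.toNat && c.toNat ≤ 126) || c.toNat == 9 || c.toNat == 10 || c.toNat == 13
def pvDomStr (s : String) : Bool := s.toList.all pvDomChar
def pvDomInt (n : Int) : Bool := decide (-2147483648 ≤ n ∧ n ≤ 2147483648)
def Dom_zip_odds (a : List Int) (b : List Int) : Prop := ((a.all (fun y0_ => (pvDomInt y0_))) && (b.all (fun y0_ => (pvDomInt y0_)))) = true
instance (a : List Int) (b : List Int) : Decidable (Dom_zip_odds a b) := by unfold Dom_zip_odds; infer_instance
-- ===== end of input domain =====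

-- B replaces A's merged two-index while-loop by a zip-the-common-prefix-then-append-tails decomposition (same cost, alternative structure).


-- ===== PORT A =====
-- get_odds: explicit append loop
def get_odds (x : List Int) : List Int :=
  x.foldl (fun ans i => if PySem.Int.mod i 2 == 1 then ans ++ [i] else ans) []

-- the 'while i < len(oa) or j < len(ob)' loop, step for step
def zipOddsLoop (oa ob : List Int) (ans : List Int) (i j : Nat) : List Int :=
  if i < oa.length ∨ j < ob.length then
    let ans1 := if i < oa.length then ans ++ [oa.getD i 0] else ans
    let i1 := if i < oa.length then i + 1 else i
    let ans2 := if j < ob.length then ans1 ++ [ob.getD j 0] else ans1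
    let j1 := if j < ob.length then j + 1 else j
    zipOddsLoop oa ob ans2 i1 j1
  else ans
termination_by (oa.length - i) + (ob.length - j)
decreasing_by
  rcases ‹i < oa.length ∨ j < ob.length› with h | h <;> split_ifs <;> omega

def zip_odds (a : List Int) (b : List Int) : List Int :=
  let oa := get_odds a
  let ob := get_odds b
  zipOddsLoop oa ob [] 0 0

-- ===== PORT B =====
def zip_odds_alt (a : List Int) (b : List Int) : List Int :=
  let oa := a.filter (fun x => PySem.Int.mod x 2 == 1)
  let ob := b.filter (fun x => PySem.Int.mod x 2 == 1)
  let out := (oa.zip ob).foldl (fun acc p => (acc ++ [p.1]) ++ [p.2]) []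
  let n := min oa.length ob.length
  (out ++ oa.drop n) ++ ob.drop n

-- ===== PRECONDITION & SPEC =====
def Spec_zip_odds (a : List Int) (b : List Int) (out : List Int) : Prop := out = zip_odds_alt a b
instance (a : List Int) (b : List Int) (out : List Int) : Decidable (Spec_zip_odds a b out) := by unfold Spec_zip_odds; infer_instance

-- ===== CLAIM (what is proved, stated in full; the proofs are below) =====
def Claim_equal_zip_odds : Prop := ∀ (a : List Int) (b : List Int), Dom_zip_odds a b → Spec_zip_odds a b (zip_odds a b)

-- ===== LEMMAS AND PROOFS =====
-- interleave the common prefix, then the leftover tail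
def itl : List Int → List Int → List Int
  | [], ys => ys
  | x :: xs, [] => x :: xs
  | x :: xs, y :: ys => x :: y :: itl xs ys

lemma get_odds_eq_filter (x : List Int) :
    get_odds x = x.filter (fun i => PySem.Int.mod i 2 == 1) := by
  unfold get_odds
  simpa using PySem.List.foldl_append_if (fun i => PySem.Int.mod i 2 == 1) id x ([] : List Int)

lemma loop_eq (oa ob ans : List Int) (i j : Nat) :
    zipOddsLoop oa ob ans i j = ans ++ itl (oa.drop i) (ob.drop j) := by
  rw [zipOddsLoop]
  by_cases hi : i < oa.length <;> by_cases hj : j < ob.length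
  · rw [if_pos (Or.inl hi)]
    simp only [if_pos hi, if_pos hj]
    rw [loop_eq oa ob _ (i+1) (j+1)]
    rw [List.drop_eq_getElem_cons hi, List.drop_eq_getElem_cons hj]
    simp [itl, List.getD, hi, hj]
  · rw [if_pos (Or.inl hi)]
    simp only [if_pos hi, if_neg hj]
    rw [loop_eq oa ob _ (i+1) j]
    rw [List.drop_eq_getElem_cons hi]
    have hd : ob.drop j = [] := List.drop_eq_nil_of_le (by omega)
    rw [hd]
    rcases hdrop : oa.drop (i+1) with _ | ⟨z, zs⟩ <;>
      simp [itl, List.getD, hi]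
  · rw [if_pos (Or.inr hj)]
    simp only [if_neg hi, if_pos hj]
    rw [loop_eq oa ob _ i (j+1)]
    rw [List.drop_eq_getElem_cons hj]
    have hd : oa.drop i = [] := List.drop_eq_nil_of_le (by omega)
    rw [hd]
    simp [itl, List.getD, hj]
  · rw [if_neg (by tauto)]
    have h1 : oa.drop i = [] := List.drop_eq_nil_of_le (by omega)
    have h2 : ob.drop j = [] := List.drop_eq_nil_of_le (by omega)
    simp [h1, h2, itl]
termination_by (oa.length - i) + (ob.length - j)
decreasing_by all_goals omega

lemma zip_flatten_eq (xs : List Int) : ∀ (ys acc : List Int),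
    ((xs.zip ys).foldl (fun acc p => (acc ++ [p.1]) ++ [p.2]) acc
      ++ xs.drop (min xs.length ys.length)) ++ ys.drop (min xs.length ys.length)
    = acc ++ itl xs ys := by
  induction xs with
  | nil => intro ys acc; cases ys <;> simp [itl]
  | cons x xs ih =>
    intro ys acc
    cases ys with
    | nil => simp [itl]
    | cons y ys =>
      simp only [List.zip_cons_cons, List.foldl_cons, List.length_cons,
        Nat.succ_min_succ, List.drop_succ_cons, itl]
      rw [ih ys (acc ++ [x] ++ [y])]
      simp

-- ===== VERDICT (by name: the statement is the Claim_ definition above) =====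
theorem zip_odds_spec : Claim_equal_zip_odds := by
  intro a b _
  unfold Spec_zip_odds zip_odds zip_odds_alt
  simp only [get_odds_eq_filter]
  rw [loop_eq]
  simpa using (zip_flatten_eq (a.filter (fun x => PySem.Int.mod x 2 == 1))
    (b.filter (fun x => PySem.Int.mod x 2 == 1)) []).symm
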